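-- pv_equiv track=rewrite | github.com/pedroanisio/dwp | json_strut.py | _analyze_div_content
-- ===== SOURCE A (Python) =====
-- from collections import Counter, defaultdict
-- from typing import Dict, List, Any, Tuple
--
-- def _analyze_div_content(content: List[Dict], path: str) -> str:
--     """Analyze content of a single div and return its structure signature."""
--     if not content:
--         return "empty"
--
--     # Count content types
--     type_counts = Counter()
--     for item in content:
--         if isinstance(item, dict):
--             item_type = item.get('type', 'unknown')
--             type_counts[item_type] += 1
--
--     # Create structure signature
--     signature_parts = []
--     for content_type, count in sorted(type_counts.items()):
--         signature_parts.append(f"{count}{content_type[0]}")  # e.g., "2p" for 2 paragraphs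
--
--     return "-".join(signature_parts) if signature_parts else "empty"
-- ===== SOURCE B (Python) =====
-- from itertools import groupby
--
--
-- def _analyze_div_content(content, path):
--     """Analyze content of a single div and return its structure signature."""
--     if not content:
--         return "empty"
--
--     types = sorted(item.get('type', 'unknown') for item in content
--                    if isinstance(item, dict))
--     parts = [f"{sum(1 for _ in grp)}{t[0]}" for t, grp in groupby(types)]
--     return "-".join(parts) if parts else "empty"
-- ===== Notes on version B (the rewrite author's own statement) =====
-- stated objective: alternative
-- what changed: Replaces the Counter hash-aggregation plus sort-of-items pass by collecting the type strings, sorting them once and counting each run with itertools.groupby.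
import Mathlib
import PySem

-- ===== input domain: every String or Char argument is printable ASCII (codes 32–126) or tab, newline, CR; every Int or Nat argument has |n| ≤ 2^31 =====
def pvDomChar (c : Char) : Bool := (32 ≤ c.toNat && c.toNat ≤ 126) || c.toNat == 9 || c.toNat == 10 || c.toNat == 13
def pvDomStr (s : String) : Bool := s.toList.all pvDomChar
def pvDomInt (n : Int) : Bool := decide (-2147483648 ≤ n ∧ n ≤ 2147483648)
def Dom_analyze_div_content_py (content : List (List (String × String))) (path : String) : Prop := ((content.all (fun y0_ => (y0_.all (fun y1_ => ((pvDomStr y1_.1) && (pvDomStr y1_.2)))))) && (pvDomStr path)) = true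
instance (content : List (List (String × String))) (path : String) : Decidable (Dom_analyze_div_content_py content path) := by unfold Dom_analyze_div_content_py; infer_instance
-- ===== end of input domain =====

-- B builds the signature by sorting the type strings once and counting runs (groupby),
-- instead of A's Counter aggregation followed by sorting the counter items; same result, similar cost.

-- shared plumbing: f"...{s[0]}" — none = IndexError, excluded by Pre_
def pvFirstChar (s : String) : String :=
  match PySem.Str.pyGet? s 0 with
  | some c => String.ofList [c]
  | none => ""

-- ===== PORT A =====
def analyze_div_content_py (content : List (List (String × String))) (path : String) : String :=
  if content = [] then "empty"
  else
    -- for item in content: if isinstance(item, dict): type_counts[item.get('type','unknown')] += 1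
    -- (every item of this type IS a dict, so the isinstance branch is always taken)
    let type_counts : PySem.Dict String Int :=
      content.foldl (fun d item => d.modify ((PySem.Dict.mk item).getD "type" "unknown") 0 (· + 1)) PySem.Dict.empty
    -- for content_type, count in sorted(type_counts.items()): parts.append(f"{count}{content_type[0]}")
    let signature_parts : List String :=
      (PySem.List.sorted2 type_counts.items Prod.fst Prod.snd).foldl
        (fun acc p => acc ++ [PySem.Int.toStr p.2 ++ pvFirstChar p.1]) []
    if signature_parts = [] then "empty" else PySem.Str.join "-" signature_parts

-- ===== PORT B =====
-- groupby over a sorted list = split off the leading run, recurse on the remainder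
def pvRuns : List String → List (String × Int)
  | [] => []
  | x :: xs =>
    (x, (List.takeWhile (· == x) xs).length + 1) :: pvRuns (List.dropWhile (· == x) xs)
termination_by l => l.length
decreasing_by
  simp only [List.length_cons]
  exact Nat.lt_succ_of_le (List.length_dropWhile_le _ _)

def analyze_div_content_py_alt (content : List (List (String × String))) (path : String) : String :=
  if content = [] then "empty"
  else
    let types : List String :=
      PySem.List.sorted (content.map (fun item => (PySem.Dict.mk item).getD "type" "unknown")) (fun t => t)
    let parts : List String := (pvRuns types).map (fun g => PySem.Int.toStr g.2 ++ pvFirstChar g.1)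
    if parts = [] then "empty" else PySem.Str.join "-" parts

-- ===== PRECONDITION & SPEC =====
-- Pre_ excludes inputs where some item's type string is empty: there Python A raises IndexError on content_type[0] (B raises there too).
def Pre_analyze_div_content_py (content : List (List (String × String))) (path : String) : Prop :=
  ∀ item ∈ content, (PySem.Dict.mk item).getD "type" "unknown" ≠ ""
instance (content : List (List (String × String))) (path : String) : Decidable (Pre_analyze_div_content_py content path) := by unfold Pre_analyze_div_content_py; infer_instance
def pvWitness_analyze_div_content_py : (List (List (String × String))) × String :=
  ([[("type", "p"), ("id", "3")], [("x", "y")], [("type", "p")]], "body/div[1]")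

def Spec_analyze_div_content_py (content : List (List (String × String))) (path : String) (out : String) : Prop := out = analyze_div_content_py_alt content path
instance (content : List (List (String × String))) (path : String) (out : String) : Decidable (Spec_analyze_div_content_py content path out) := by unfold Spec_analyze_div_content_py; infer_instance

-- ===== CLAIM (what is proved, stated in full; the proofs are below) =====
def Claim_equal_analyze_div_content_py : Prop := ∀ (content : List (List (String × String))) (path : String), Dom_analyze_div_content_py content path → Pre_analyze_div_content_py content path → Spec_analyze_div_content_py content path (analyze_div_content_py content path)

-- ===== LEMMAS AND PROOFS =====

-- insertBy only looks at comparisons of x against members of the accumulator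
theorem pvInsertBy_congr {α : Type} (p q : α → α → Bool) (x : α) (acc : List α)
    (h : ∀ y ∈ acc, p x y = q x y) :
    PySem.List.insertBy p x acc = PySem.List.insertBy q x acc := by
  induction acc with
  | nil => rfl
  | cons y ys ih =>
    simp only [PySem.List.insertBy, h y (by simp)]
    by_cases hq : q x y = true
    · simp [hq]
    · simp only [Bool.not_eq_true] at hq
      simp [hq, ih (fun z hz => h z (by simp [hz]))]

theorem pvFoldl_insertBy_congr {α : Type} (p q : α → α → Bool) (S : α → Prop)
    (hpq : ∀ a b, S a → S b → p a b = q a b) :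
    ∀ (xs acc : List α), (∀ a ∈ xs, S a) → (∀ a ∈ acc, S a) →
      xs.foldl (fun acc x => PySem.List.insertBy p x acc) acc
        = xs.foldl (fun acc x => PySem.List.insertBy q x acc) acc := by
  intro xs
  induction xs with
  | nil => intro acc _ _; rfl
  | cons x xs ih =>
    intro acc hxs hacc
    simp only [List.foldl_cons]
    rw [pvInsertBy_congr p q x acc (fun y hy => hpq x y (hxs x (by simp)) (hacc y hy))]
    exact ih _ (fun a ha => hxs a (by simp [ha]))
      (fun a ha => by
        rcases (PySem.List.mem_insertBy _ _ _ _).1 ha with h | h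
        · exact h ▸ hxs x (by simp)
        · exact hacc a h)

-- sorted(items) with pairwise-distinct first components is sorting by the first component
theorem pvSorted2_eq_sorted_fst {α κ₁ κ₂ : Type} [LinearOrder κ₁] [LinearOrder κ₂]
    (xs : List α) (k1 : α → κ₁) (k2 : α → κ₂)
    (hinj : ∀ a ∈ xs, ∀ b ∈ xs, k1 a = k1 b → a = b) :
    PySem.List.sorted2 xs k1 k2 = PySem.List.sorted xs k1 := by
  simp only [PySem.List.sorted2, PySem.List.sorted]
  exact pvFoldl_insertBy_congr _ _ (fun a => a ∈ xs)
    (fun a b ha hb => by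
      by_cases h : k1 a < k1 b
      · simp [h]
      · by_cases h' : k1 b < k1 a
        · simp [h, h', not_lt_of_gt h']
        · have : k1 a = k1 b := le_antisymm (not_lt.1 h') (not_lt.1 h)
          have hab : a = b := hinj a ha b hb this
          subst hab; simp [h])
    xs [] (fun a ha => ha) (by simp)

-- runs of a ≤-sorted list: one entry per distinct element, carrying its multiplicity
theorem pvRuns_sorted (l S : List String) (hl : l.Pairwise (· ≤ ·)) (hS : S.Pairwise (· < ·))
    (hmem : ∀ k, k ∈ S ↔ k ∈ l) :
    pvRuns l = S.map (fun k => (k, (List.count k l : Int))) := by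
  induction l using pvRuns.induct generalizing S with
  | case1 =>
    cases S with
    | nil => simp [pvRuns]
    | cons s S' => exact absurd ((hmem s).1 (by simp)) (by simp)
  | case2 x xs ih =>
    have hx : ∀ y ∈ xs, x ≤ y := fun y hy => List.rel_of_pairwise_cons hl hy
    have hxs : xs.Pairwise (· ≤ ·) := hl.of_cons
    have hgrp : ∀ y ∈ List.takeWhile (· == x) xs, y = x := by
      intro y hy
      simpa using List.mem_takeWhile_imp hy
    have hrest_pw : (List.dropWhile (· == x) xs).Pairwise (· ≤ ·) :=
      hxs.sublist (List.dropWhile_sublist _)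
    have hrest_mem : ∀ y ∈ List.dropWhile (· == x) xs, y ∈ xs :=
      fun y hy => (List.dropWhile_sublist _).mem hy
    have hxnotin : x ∉ List.dropWhile (· == x) xs := by
      cases hdw : List.dropWhile (· == x) xs with
      | nil => simp
      | cons h t =>
        have hh := List.head?_dropWhile_not (· == x) xs
        rw [hdw] at hh
        have hhx : h ≠ x := by simpa using hh
        have hht : ∀ y ∈ t, h ≤ y := fun y hy => List.rel_of_pairwise_cons (hdw ▸ hrest_pw) hy
        have hxh : x < h := lt_of_le_of_ne (hx h (hrest_mem h (by simp [hdw]))) (Ne.symm hhx)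
        simp only [List.mem_cons, not_or]
        refine ⟨Ne.symm hhx, fun hxt => ?_⟩
        exact absurd (hht x hxt) (not_le.2 hxh)
    -- S must start with x
    have hxS : x ∈ S := (hmem x).2 (by simp)
    cases S with
    | nil => simp at hxS
    | cons s S' =>
      have hsS' : ∀ y ∈ S', s < y := fun y hy => List.rel_of_pairwise_cons hS hy
      have hsl : s ∈ x :: xs := (hmem s).1 (by simp)
      have hsx : s = x := by
        rcases List.mem_cons.1 hsl with h | h
        · exact h
        · -- s ∈ xs so x ≤ s; and s ≤ x since x ∈ S and s is the head of the <-sorted S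
          rcases List.mem_cons.1 hxS with h' | h'
          · exact h'.symm
          · exact le_antisymm (le_of_lt (hsS' x h')) (hx s h) |>.symm ▸ rfl
      subst hsx
      have hS'pw : S'.Pairwise (· < ·) := hS.of_cons
      have hS'mem : ∀ k, k ∈ S' ↔ k ∈ List.dropWhile (· == s) xs := by
        intro k
        constructor
        · intro hk
          have hks : s < k := hsS' k hk
          have hkl : k ∈ s :: xs := (hmem k).1 (by simp [hk])
          have hkxs : k ∈ xs := by
            rcases List.mem_cons.1 hkl with h | h
            · exact absurd (h ▸ hks) (lt_irrefl _)
            · exact h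
          have : k ∈ List.takeWhile (· == s) xs ∨ k ∈ List.dropWhile (· == s) xs :=
            List.mem_append.mp (by rw [List.takeWhile_append_dropWhile]; exact hkxs)
          rcases this with h | h
          · exact absurd (hgrp k h ▸ hks) (lt_irrefl _)
          · exact h
        · intro hk
          have hkxs : k ∈ xs := hrest_mem k hk
          have hkS : k ∈ s :: S' := (hmem k).2 (by simp [hkxs])
          rcases List.mem_cons.1 hkS with h | h
          · exact absurd (h ▸ hk) hxnotin
          · exact h
      have hcount : ∀ k ∈ S', List.count k (s :: xs) = List.count k (List.dropWhile (· == s) xs) := by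
        intro k hk
        have hks : k ≠ s := fun h => absurd (h ▸ hk) (fun hh => lt_irrefl s (hsS' s hh))
        rw [List.count_cons_of_ne hks.symm]
        conv_lhs => rw [← List.takeWhile_append_dropWhile (p := (· == s)) (l := xs)]
        rw [List.count_append]
        have : List.count k (List.takeWhile (· == s) xs) = 0 := by
          rw [List.count_eq_zero]
          intro hks'
          exact hks (hgrp k hks')
        omega
      have hcx : List.count s (s :: xs) = (List.takeWhile (· == s) xs).length + 1 := by
        rw [List.count_cons_self]
        conv_lhs => rw [← List.takeWhile_append_dropWhile (p := (· == s)) (l := xs)]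
        rw [List.count_append]
        have h1 : List.count s (List.takeWhile (· == s) xs) = (List.takeWhile (· == s) xs).length :=
          List.count_eq_length.2 (fun y hy => by simp [hgrp y hy])
        have h2 : List.count s (List.dropWhile (· == s) xs) = 0 := List.count_eq_zero.2 hxnotin
        omega
      rw [pvRuns]
      rw [ih S' hrest_pw hS'pw hS'mem]
      simp only [List.map_cons]
      congr 1
      · rw [hcx]; push_cast; rfl
      · apply List.map_congr_left
        intro k hk
        rw [hcount k hk]

theorem pvMain (content : List (List (String × String))) (path : String) :
    analyze_div_content_py content path = analyze_div_content_py_alt content path := by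
  by_cases hc : content = []
  · simp [analyze_div_content_py, analyze_div_content_py_alt, hc]
  · -- abbreviations
    set g : List (String × String) → String := fun item => (PySem.Dict.mk item).getD "type" "unknown" with hgdef
    set ts : List String := content.map g with hts
    set ds : List String := PySem.List.sorted (PySem.Set.ofList ts) (fun x => x) with hds
    have hdsp : ds.Pairwise (· < ·) := PySem.List.sorted_ofList_pairwise_lt ts
    have hdsperm : ds.Perm (PySem.Set.ofList ts) := PySem.List.sorted_perm _ _ _
    -- A side: the counter loop is Counter(ts)
    have hcnt : content.foldl (fun d item => d.modify (g item) 0 (· + 1)) PySem.Dict.empty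
        = PySem.Dict.counter ts := by
      rw [hts, PySem.Dict.counter_eq_foldl, List.foldl_map]
    have hitems : (PySem.Dict.counter ts).items
        = (PySem.Set.ofList ts).map (fun k => (k, (List.count k ts : Int))) :=
      PySem.Dict.items_counter ts
    have hinj : ∀ a ∈ (PySem.Set.ofList ts).map (fun k => (k, (List.count k ts : Int))),
        ∀ b ∈ (PySem.Set.ofList ts).map (fun k => (k, (List.count k ts : Int))),
        a.1 = b.1 → a = b := by
      intro a ha b hb hab
      rcases List.mem_map.1 ha with ⟨ka, _, rfl⟩
      rcases List.mem_map.1 hb with ⟨kb, _, rfl⟩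
      simp only at hab
      subst hab
      rfl
    have hsorted2 : PySem.List.sorted2 ((PySem.Set.ofList ts).map (fun k => (k, (List.count k ts : Int)))) Prod.fst Prod.snd
        = PySem.List.sorted ((PySem.Set.ofList ts).map (fun k => (k, (List.count k ts : Int)))) Prod.fst :=
      pvSorted2_eq_sorted_fst _ _ _ hinj
    have hsortA : PySem.List.sorted ((PySem.Set.ofList ts).map (fun k => (k, (List.count k ts : Int)))) Prod.fst
        = ds.map (fun k => (k, (List.count k ts : Int))) :=
      PySem.List.sorted_eq_of_perm_of_pairwise_lt _ _ _
        (hdsperm.map _) (List.pairwise_map.2 (by simpa using hdsp))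
    -- B side: runs of the sorted type list
    have hmemB : ∀ k, k ∈ ds ↔ k ∈ PySem.List.sorted ts (fun t => t) := by
      intro k
      rw [hds, PySem.List.mem_sorted, PySem.List.mem_sorted, PySem.Set.mem_ofList]
    have hrunsB : pvRuns (PySem.List.sorted ts (fun t => t))
        = ds.map (fun k => (k, (List.count k (PySem.List.sorted ts (fun t => t)) : Int))) :=
      pvRuns_sorted _ ds (by simpa using PySem.List.sorted_pairwise ts (fun t => t)) hdsp hmemB
    have hcountperm : ∀ k, List.count k (PySem.List.sorted ts (fun t => t)) = List.count k ts :=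
      fun k => (PySem.List.sorted_perm ts (fun t => t) false).count_eq k
    have hrunsB' : pvRuns (PySem.List.sorted ts (fun t => t))
        = ds.map (fun k => (k, (List.count k ts : Int))) := by
      rw [hrunsB]
      exact List.map_congr_left (fun k _ => by rw [hcountperm k])
    -- assemble
    show analyze_div_content_py content path = analyze_div_content_py_alt content path
    simp only [analyze_div_content_py, analyze_div_content_py_alt, if_neg hc]
    rw [hcnt, hitems, hsorted2, hsortA, ← hts, hrunsB']
    simp only [PySem.List.foldl_append_singleton_eq_map, List.map_map, List.nil_append]

-- ===== VERDICT (by name: the statement is the Claim_ definition above) =====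
theorem analyze_div_content_py_spec : Claim_equal_analyze_div_content_py := by
  intro content path _ _
  exact pvMain content path
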